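-- pv_equiv track=rewrite | github.com/the-omega-institute/automath | theory/2026_golden_ratio_driven_scan_projection_generation_recursive_emergence/scripts/equational_theory/linear_magma_search.py | anti_implications_from_patterns
-- ===== SOURCE A (Python) =====
-- def anti_implications_from_patterns(patterns: set[tuple[int, ...]], equation_ids: set[int]) -> set[tuple[int, int]]:
--     anti_implications: set[tuple[int, int]] = set()
--     for pattern in patterns:
--         satisfied = set(pattern)
--         refuted = equation_ids - satisfied
--         for antecedent in satisfied:
--             for consequent in refuted:
--                 anti_implications.add((antecedent, consequent))
--     return anti_implications
-- ===== SOURCE B (Python) =====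
-- def anti_implications_from_patterns(patterns: set[tuple[int, ...]], equation_ids: set[int]) -> set[tuple[int, int]]:
--     # Per-antecedent shrinking candidate lists: alive[a] is the part of the universe not yet
--     # refuted for antecedent a; each pattern PARTITIONS alive[a] into the kept part (inside the
--     # pattern) and the emitted part (newly refuted consequents).  No global pair set, no
--     # per-pattern set difference, no pair-membership tests.
--     universe = list(equation_ids)
--     alive: dict[int, list[int]] = {}
--     out: list[tuple[int, int]] = []
--     for pattern in patterns:
--         sp = set(pattern)
--         for a in sp:
--             cand = alive.get(a, universe)
--             emitted = [c for c in cand if c not in sp]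
--             alive[a] = [c for c in cand if c in sp]
--             out.extend((a, c) for c in emitted)
--     return set(out)
-- ===== Notes on version B (the rewrite author's own statement) =====
-- stated objective: alternative
-- what changed: B drops A's global pair-set with per-pair dedup: it keeps for each antecedent a shrinking candidate list of not-yet-refuted consequents and partitions it against each pattern, emitting the removed part, so it computes no per-pattern set difference and tests no pair membership.
import Mathlib
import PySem

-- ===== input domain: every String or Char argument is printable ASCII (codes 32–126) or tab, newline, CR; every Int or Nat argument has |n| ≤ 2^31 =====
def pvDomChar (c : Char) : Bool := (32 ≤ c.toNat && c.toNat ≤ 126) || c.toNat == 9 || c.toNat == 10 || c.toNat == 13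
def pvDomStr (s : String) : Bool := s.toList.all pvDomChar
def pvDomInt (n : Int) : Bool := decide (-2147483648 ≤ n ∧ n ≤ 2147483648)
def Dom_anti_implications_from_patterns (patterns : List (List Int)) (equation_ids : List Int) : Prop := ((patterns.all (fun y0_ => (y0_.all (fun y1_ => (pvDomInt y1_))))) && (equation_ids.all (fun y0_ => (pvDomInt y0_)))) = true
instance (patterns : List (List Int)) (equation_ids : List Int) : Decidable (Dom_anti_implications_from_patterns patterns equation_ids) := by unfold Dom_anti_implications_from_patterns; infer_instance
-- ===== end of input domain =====

-- B replaces A's global pair-set (dedup pair by pair) with per-antecedent shrinking candidate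
-- lists partitioned against each pattern (objective: alternative, same asymptotic cost).

-- ===== PORT A =====
def anti_implications_from_patterns (patterns : List (List Int)) (equation_ids : List Int) : List (Int × Int) :=
  patterns.foldl
    (fun anti pattern =>
      let satisfied : PySem.Set Int := PySem.Set.ofList pattern
      let refuted : PySem.Set Int := PySem.Set.diff equation_ids satisfied
      satisfied.foldl
        (fun anti1 antecedent =>
          refuted.foldl
            (fun anti2 consequent => PySem.Set.add anti2 (antecedent, consequent)) anti1)
        anti)
    PySem.Set.empty

-- ===== PORT B =====
def anti_implications_from_patterns_alt (patterns : List (List Int)) (equation_ids : List Int) : List (Int × Int) :=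
  let univ := equation_ids
  let result :=
    patterns.foldl
      (fun st pattern =>
        let sp : PySem.Set Int := PySem.Set.ofList pattern
        sp.foldl
          (fun st1 a =>
            let cand := st1.1.getD a univ
            let emitted := cand.filter (fun c => !(PySem.Set.contains sp c))
            (st1.1.insert a (cand.filter (fun c => PySem.Set.contains sp c)),
             st1.2 ++ emitted.map (fun c => (a, c))))
          st)
      ((PySem.Dict.mk [] : PySem.Dict Int (List Int)), ([] : List (Int × Int)))
  PySem.Set.ofList result.2

-- ===== PRECONDITION & SPEC =====
-- Pre_ only says that the set-typed argument equation_ids lists DISTINCT elements, as the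
-- set→List type convention guarantees; no actual Python set input is excluded by it.
def Pre_anti_implications_from_patterns (patterns : List (List Int)) (equation_ids : List Int) : Prop :=
  equation_ids.Nodup
instance (patterns : List (List Int)) (equation_ids : List Int) : Decidable (Pre_anti_implications_from_patterns patterns equation_ids) := by unfold Pre_anti_implications_from_patterns; infer_instance
def pvWitness_anti_implications_from_patterns : List (List Int) × List Int := ([[1], [2, 1]], [1, 2, 3])

def Spec_anti_implications_from_patterns (patterns : List (List Int)) (equation_ids : List Int) (out : List (Int × Int)) : Prop := out = anti_implications_from_patterns_alt patterns equation_ids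
instance (patterns : List (List Int)) (equation_ids : List Int) (out : List (Int × Int)) : Decidable (Spec_anti_implications_from_patterns patterns equation_ids out) := by unfold Spec_anti_implications_from_patterns; infer_instance

-- ===== CLAIM (what is proved, stated in full; the proofs are below) =====
def Claim_equal_anti_implications_from_patterns : Prop := ∀ (patterns : List (List Int)) (equation_ids : List Int), Dom_anti_implications_from_patterns patterns equation_ids → Pre_anti_implications_from_patterns patterns equation_ids → Spec_anti_implications_from_patterns patterns equation_ids (anti_implications_from_patterns patterns equation_ids)

-- ===== LEMMAS AND PROOFS =====

-- the raw stream of pairs A's triple loop runs through (before set-deduplication)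
def pvChunk (equation_ids pattern : List Int) : List (Int × Int) :=
  (PySem.Set.ofList pattern).flatMap
    (fun a => (PySem.Set.diff equation_ids (PySem.Set.ofList pattern)).map (fun c => (a, c)))

def pvStream (equation_ids : List Int) (patterns : List (List Int)) : List (Int × Int) :=
  patterns.flatMap (pvChunk equation_ids)

lemma foldl_inner_A (sat ref : List Int) (X : PySem.Set (Int × Int)) :
    sat.foldl (fun acc a => ref.foldl (fun acc2 c => PySem.Set.add acc2 (a, c)) acc) X
      = PySem.Set.update X (sat.flatMap (fun a => ref.map (fun c => (a, c)))) := by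
  induction sat generalizing X with
  | nil => rfl
  | cons a sat ih =>
    rw [List.foldl_cons, ← PySem.Set.update_map_eq_foldl_add, ih, List.flatMap_cons,
      PySem.Set.update_append]

lemma foldl_A (equation_ids : List Int) (patterns : List (List Int)) (X : PySem.Set (Int × Int)) :
    patterns.foldl
        (fun anti pattern =>
          (PySem.Set.ofList pattern).foldl
            (fun anti1 antecedent =>
              (PySem.Set.diff equation_ids (PySem.Set.ofList pattern)).foldl
                (fun anti2 consequent => PySem.Set.add anti2 (antecedent, consequent)) anti1)
            anti)
        X
      = PySem.Set.update X (pvStream equation_ids patterns) := by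
  induction patterns generalizing X with
  | nil => rfl
  | cons p ps ih =>
    rw [List.foldl_cons, foldl_inner_A, ih]
    simp only [pvStream, pvChunk, List.flatMap_cons, PySem.Set.update_append]

-- invariant for B's fold state over the processed prefix s of A's pair stream: the out list IS
-- the deduplicated stream, and each candidate list holds the consequents not yet paired with a
def pvInv (E : List Int) (st : PySem.Dict Int (List Int) × List (Int × Int))
    (s : List (Int × Int)) : Prop :=
  st.2 = PySem.Set.ofList s ∧
  ∀ a : Int, st.1.getD a E = E.filter (fun c => !(s.contains (a, c)))

lemma pair_inj (a : Int) : Function.Injective (fun c : Int => (a, c)) :=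
  fun _ _ h => (Prod.ext_iff.mp h).2

lemma mem_pvchunk (E p : List Int) (a a' c : Int) :
    (a', c) ∈ (PySem.Set.diff E (PySem.Set.ofList p)).map (fun c => (a, c)) ↔
      a' = a ∧ c ∈ E ∧ c ∉ PySem.Set.ofList p := by
  simp only [List.mem_map, PySem.Set.mem_diff, Prod.mk.injEq]
  constructor
  · rintro ⟨c', ⟨hcE, hcp⟩, rfl, rfl⟩
    exact ⟨rfl, hcE, hcp⟩
  · rintro ⟨rfl, hcE, hcp⟩
    exact ⟨c, ⟨hcE, hcp⟩, rfl, rfl⟩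

lemma stepB (E p : List Int) (hE : E.Nodup) (a : Int)
    (cov : PySem.Dict Int (List Int)) (out : List (Int × Int)) (s : List (Int × Int))
    (h1 : out = PySem.Set.ofList s)
    (h2 : ∀ a' : Int, cov.getD a' E = E.filter (fun c => !(s.contains (a', c)))) :
    pvInv E
      (cov.insert a ((cov.getD a E).filter (fun c => PySem.Set.contains (PySem.Set.ofList p) c)),
       out ++ ((cov.getD a E).filter (fun c => !(PySem.Set.contains (PySem.Set.ofList p) c))).map
         (fun c => (a, c)))
      (s ++ (PySem.Set.diff E (PySem.Set.ofList p)).map (fun c => (a, c))) := by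
  constructor
  · -- out part
    subst h1
    show PySem.Set.ofList s ++ _ = _
    have hnd : ((PySem.Set.diff E (PySem.Set.ofList p)).map (fun c => (a, c))).Nodup :=
      (PySem.Set.nodup_diff _ _ hE).map (pair_inj a)
    rw [PySem.Set.ofList_append, PySem.Set.update_eq_append_filter,
      PySem.Set.ofList_eq_self_of_nodup _ hnd]
    congr 1
    rw [h2 a]
    show List.map _ (List.filter _ (List.filter _ E)) = List.filter _ (List.map _ _)
    rw [List.filter_map, List.filter_filter]
    show _ = List.map _ (List.filter _ (List.filter _ E))
    rw [List.filter_filter]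
    congr 1
    apply List.filter_congr
    intro c hcE
    simp only [Function.comp, PySem.Set.contains_eq_listContains, List.contains_eq_mem,
      ← decide_not, ← Bool.decide_and, decide_eq_decide, PySem.Set.mem_ofList]
    constructor
    · rintro ⟨hnp, hns⟩; exact ⟨hns, hnp⟩
    · rintro ⟨hns, hnp⟩; exact ⟨hnp, hns⟩
  · -- dict part
    intro a'
    show (PySem.Dict.insert ..).getD a' E = _
    rw [PySem.Dict.getD_insert]
    by_cases ha : a' = a
    · subst ha
      rw [if_pos rfl, h2 a', List.filter_filter]
      apply List.filter_congr
      intro c hcE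
      simp only [PySem.Set.contains_eq_listContains, List.contains_eq_mem, List.mem_append,
        ← decide_not, ← Bool.decide_and, decide_eq_decide, mem_pvchunk, PySem.Set.mem_ofList]
      tauto
    · rw [if_neg ha, h2 a']
      apply List.filter_congr
      intro c _
      simp only [List.contains_eq_mem, List.mem_append, ← decide_not, decide_eq_decide,
        mem_pvchunk]
      tauto

lemma foldl_inner_B (E p : List Int) (hE : E.Nodup) (sat : List Int)
    (st : PySem.Dict Int (List Int) × List (Int × Int)) (s : List (Int × Int))
    (h : pvInv E st s) :
    pvInv E
      (sat.foldl
        (fun st1 a =>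
          (st1.1.insert a ((st1.1.getD a E).filter
             (fun c => PySem.Set.contains (PySem.Set.ofList p) c)),
           st1.2 ++ ((st1.1.getD a E).filter
             (fun c => !(PySem.Set.contains (PySem.Set.ofList p) c))).map (fun c => (a, c))))
        st)
      (s ++ sat.flatMap (fun a => (PySem.Set.diff E (PySem.Set.ofList p)).map (fun c => (a, c)))) := by
  induction sat generalizing st s with
  | nil => simpa using h
  | cons a sat ih =>
    obtain ⟨cov, out⟩ := st
    have hstep := stepB E p hE a cov out s h.1 h.2
    have := ih _ _ hstep
    simpa [List.append_assoc] using this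

lemma foldl_B (E : List Int) (hE : E.Nodup) (patterns : List (List Int))
    (st : PySem.Dict Int (List Int) × List (Int × Int)) (s : List (Int × Int))
    (h : pvInv E st s) :
    pvInv E
      (patterns.foldl
        (fun st pattern =>
          (PySem.Set.ofList pattern).foldl
            (fun st1 a =>
              (st1.1.insert a ((st1.1.getD a E).filter
                 (fun c => PySem.Set.contains (PySem.Set.ofList pattern) c)),
               st1.2 ++ ((st1.1.getD a E).filter
                 (fun c => !(PySem.Set.contains (PySem.Set.ofList pattern) c))).map
                 (fun c => (a, c))))
            st)
        st)
      (s ++ pvStream E patterns) := by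
  induction patterns generalizing st s with
  | nil => simpa [pvStream] using h
  | cons p ps ih =>
    have hstep := foldl_inner_B E p hE (PySem.Set.ofList p) st s h
    have := ih _ _ hstep
    simpa [pvStream, pvChunk, List.append_assoc] using this

lemma pvInv_init (E : List Int) : pvInv E ((PySem.Dict.mk [] : PySem.Dict Int (List Int)), []) [] := by
  constructor
  · rfl
  · intro a
    simp [PySem.Dict.getD, PySem.Dict.get?]

-- ===== VERDICT (by name: the statement is the Claim_ definition above) =====
theorem anti_implications_from_patterns_spec : Claim_equal_anti_implications_from_patterns := by
  intro patterns equation_ids _ hPre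
  show anti_implications_from_patterns patterns equation_ids
      = anti_implications_from_patterns_alt patterns equation_ids
  have hA := foldl_A equation_ids patterns PySem.Set.empty
  have hB := foldl_B equation_ids hPre patterns _ [] (pvInv_init equation_ids)
  simp only [anti_implications_from_patterns, anti_implications_from_patterns_alt]
  rw [hA, hB.1]
  show PySem.Set.update [] _ = _
  rw [PySem.Set.update_nil_left, PySem.Set.ofList_ofList, List.nil_append]
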